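-- pv_equiv track=rewrite | github.com/lovesegfault/beautysh | tests/__init__.py | highlight_string
-- ===== SOURCE A (Python) =====
-- def highlight_string(string: str) -> str:
--     """Highlight whitespace in strings for debugging test failures."""
--     if len(string) == 0:
--         return string
--
--     output = ""
--     idx = 0
--     while idx < len(string) and (string[idx] == " " or string[idx] == "\t"):
--         if string[idx] == " ":
--             output += "."
--         elif string[idx] == "\t":
--             output += "T"
--         idx += 1
--     if idx < len(string):
--         output += string[idx:]
--     return output
-- ===== SOURCE B (Python) =====
-- def highlight_string(string: str) -> str:
--     """Highlight whitespace in strings for debugging test failures."""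
--     idx = 0
--     while idx < len(string) and string[idx] in " \t":
--         idx += 1
--     return string[:idx].translate(str.maketrans({" ": ".", "\t": "T"})) + string[idx:]
-- ===== Notes on version B (the rewrite author's own statement) =====
-- stated objective: simpler
-- what changed: B separates detection from transformation: it finds the length of the leading space/tab run, then translates that prefix in bulk and appends the untouched tail, instead of A's interleaved loop that accumulates the output one character at a time.
import Mathlib
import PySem

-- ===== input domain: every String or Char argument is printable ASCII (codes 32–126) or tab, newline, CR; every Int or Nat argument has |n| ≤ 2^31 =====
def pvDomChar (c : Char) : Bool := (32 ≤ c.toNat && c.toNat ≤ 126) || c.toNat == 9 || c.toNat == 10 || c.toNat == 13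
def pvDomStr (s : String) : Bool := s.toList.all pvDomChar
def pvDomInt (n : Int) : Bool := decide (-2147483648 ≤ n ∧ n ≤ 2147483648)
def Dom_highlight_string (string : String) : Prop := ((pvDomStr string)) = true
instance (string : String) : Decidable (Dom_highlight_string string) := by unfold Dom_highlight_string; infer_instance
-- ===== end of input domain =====

-- B separates detecting the leading space/tab run from transforming it (bulk map of the prefix),
-- instead of A's interleaved char-by-char accumulation loop; objective: simpler.
-- ===== PORT A =====
-- while loop of A: consume leading spaces/tabs, appending '.'/'T' to output; on the first
-- other char (idx < len) append the rest of the string and stop.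
def pvALoop : List Char → String → String
  | [], out => out
  | c :: rest, out =>
    if c = ' ' then pvALoop rest (out ++ ".")
    else if c = '\t' then pvALoop rest (out ++ "T")
    else out ++ String.ofList (c :: rest)

def highlight_string (string : String) : String :=
  if string.length = 0 then string
  else pvALoop string.toList ""

-- ===== PORT B =====
def highlight_string_alt (string : String) : String :=
  let cs := string.toList
  let pre := cs.takeWhile (fun c => c == ' ' || c == '\t')
  let rest := cs.dropWhile (fun c => c == ' ' || c == '\t')
  String.ofList (pre.map (fun c => if c = ' ' then '.' else 'T') ++ rest)

-- ===== PRECONDITION & SPEC =====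
def Spec_highlight_string (string : String) (out : String) : Prop := out = highlight_string_alt string
instance (string : String) (out : String) : Decidable (Spec_highlight_string string out) := by unfold Spec_highlight_string; infer_instance

-- ===== CLAIM (what is proved, stated in full; the proofs are below) =====
def Claim_equal_highlight_string : Prop := ∀ (string : String), Dom_highlight_string string → Spec_highlight_string string (highlight_string string)

-- ===== LEMMAS AND PROOFS =====

theorem pvALoop_toList (l : List Char) : ∀ (out : String),
    (pvALoop l out).toList = out.toList ++
      ((l.takeWhile (fun c => c == ' ' || c == '\t')).map
        (fun c => if c = ' ' then '.' else 'T') ++ l.dropWhile (fun c => c == ' ' || c == '\t')) := by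
  induction l with
  | nil => intro out; simp [pvALoop]
  | cons c rest ih =>
    intro out
    by_cases h : c = ' '
    · subst h
      simp [pvALoop, ih]
    · by_cases h2 : c = '\t'
      · subst h2
        simp [pvALoop, h, ih]
      · simp [pvALoop, h, h2]

-- ===== VERDICT (by name: the statement is the Claim_ definition above) =====
theorem highlight_string_spec : Claim_equal_highlight_string := by
  intro s _
  unfold Spec_highlight_string
  by_cases hs : s = ""
  · subst hs; decide
  · have key : (highlight_string s).toList = (highlight_string_alt s).toList := by
      unfold highlight_string highlight_string_alt
      simp [hs, pvALoop_toList]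
    simpa using congrArg String.ofList key
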